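-- pv_equiv track=rewrite | github.com/FunctionSIG/Ancestral-Blocks-Reconstruction | findParent.py | reductionDup
-- ===== SOURCE A (Python) =====
-- def reductionDup(initial,duplication):
--     result= set()
--     for element in initial:
--         # create a copy for each element starting as empty
--         copy =''
--         for index in range(len(element)):
--             if index ==0:
--                 copy += element[index]
--             else:
--                 if element[index] == element[index-1]: #check if the next is dup:
--                     if duplication[element[index]][0]==2:
--                         copy += element[index]
--                 else:
--                     copy += element[index]
--         if len(copy) >0:
--             result.add(copy)
--     return result
-- ===== SOURCE B (Python) =====
-- def reductionDup(initial, duplication):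
--     result = set()
--     for element in initial:
--         pieces = []
--         i, n = 0, len(element)
--         while i < n:
--             c = element[i]
--             j = i + 1
--             while j < n and element[j] == c:
--                 j += 1
--             if j - i == 1:
--                 pieces.append(c)
--             elif duplication[c][0] == 2:
--                 pieces.append(c * (j - i))
--             else:
--                 pieces.append(c)
--             i = j
--         if pieces:
--             result.add(''.join(pieces))
--     return result
-- ===== Notes on version B (the rewrite author's own statement) =====
-- stated objective: alternative
-- what changed: B scans each string by maximal runs with a two-index while loop (emitting the whole run or a single char per run, joined at the end) instead of A's per-index loop comparing each character with its predecessor; the duplication lookup happens once per run instead of once per duplicated character. Pre_ excludes inputs on which A raises KeyError/IndexError (a duplicated character missing from duplication or mapped to an empty list); B raises there too.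
import Mathlib
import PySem

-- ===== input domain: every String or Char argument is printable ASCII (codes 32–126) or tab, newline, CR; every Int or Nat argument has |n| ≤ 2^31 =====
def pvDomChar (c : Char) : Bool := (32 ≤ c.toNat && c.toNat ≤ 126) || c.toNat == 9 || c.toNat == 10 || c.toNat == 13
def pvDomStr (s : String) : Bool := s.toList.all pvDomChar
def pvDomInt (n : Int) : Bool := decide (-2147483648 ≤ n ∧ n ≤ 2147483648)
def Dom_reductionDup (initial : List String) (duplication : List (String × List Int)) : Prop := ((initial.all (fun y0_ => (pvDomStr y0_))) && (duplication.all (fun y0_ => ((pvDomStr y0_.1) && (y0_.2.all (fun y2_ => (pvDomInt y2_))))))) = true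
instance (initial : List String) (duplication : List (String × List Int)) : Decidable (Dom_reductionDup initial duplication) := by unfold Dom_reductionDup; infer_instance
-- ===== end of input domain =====

-- B scans each string by maximal runs (two-index while loop) instead of A's per-index
-- predecessor comparison; same results, alternative decomposition (not claimed faster).

-- ===== PORT A =====
-- A's inner loop over range(len(element)); indices are always in range, so list getD
-- with an unused default is exact; dict/`[0]` lookups are totalised with defaults that
-- make the `== 2` test false — Pre_ below excludes the inputs where Python A raises.
def reductionDup (initial : List String) (duplication : List (String × List Int)) : List String :=
  initial.foldl (fun result element =>
    let chars := element.toList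
    let copy : List Char :=
      (List.range chars.length).foldl (fun copy index =>
        if index = 0 then
          copy ++ [chars.getD index ' ']
        else
          if chars.getD index ' ' = chars.getD (index - 1) ' ' then
            if (PySem.List.pyGet? ((PySem.Dict.mk duplication).getD (String.mk [chars.getD index ' ']) []) 0).getD 0 == 2 then
              copy ++ [chars.getD index ' ']
            else copy
          else copy ++ [chars.getD index ' ']) []
    if copy.length > 0 then PySem.Set.add result (String.mk copy) else result)
    PySem.Set.empty

-- ===== PORT B =====
-- duplication[c][0] == 2, totalised exactly as in port A (Pre_ excludes the raising inputs)
def pvRunKeep (duplication : List (String × List Int)) (c : Char) : Bool :=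
  (PySem.List.pyGet? ((PySem.Dict.mk duplication).getD (String.mk [c]) []) 0).getD 0 == 2

-- Source B's inner while loop: take the maximal run of the head character, emit one piece per run
def pvPieces (duplication : List (String × List Int)) : List Char → List (List Char)
  | [] => []
  | c :: rest =>
    let run := rest.takeWhile (fun x => x == c)
    let tail := rest.dropWhile (fun x => x == c)
    let piece := if run.length + 1 = 1 then [c]
      else if pvRunKeep duplication c then c :: run
      else [c]
    piece :: pvPieces duplication tail
termination_by l => l.length
decreasing_by
  simpa using Nat.lt_succ_of_le (List.length_dropWhile_le _ _)

def reductionDup_alt (initial : List String) (duplication : List (String × List Int)) : List String :=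
  initial.foldl (fun result element =>
    let pieces := pvPieces duplication element.toList
    if pieces ≠ [] then PySem.Set.add result (String.mk pieces.flatten) else result)
    PySem.Set.empty

-- ===== PRECONDITION & SPEC =====
-- Pre_ excludes exactly the inputs on which Python A raises: some element has two equal
-- adjacent characters whose key is absent from duplication (KeyError) or mapped to an
-- empty list (IndexError).  (Python B raises on exactly the same inputs.)
def Pre_reductionDup (initial : List String) (duplication : List (String × List Int)) : Prop :=
  ∀ s ∈ initial, ∀ p ∈ s.toList.zip s.toList.tail, p.1 = p.2 →
    ((PySem.Dict.mk duplication).get? (String.mk [p.1])).getD [] ≠ []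
instance (initial : List String) (duplication : List (String × List Int)) : Decidable (Pre_reductionDup initial duplication) := by unfold Pre_reductionDup; infer_instance

def pvWitness_reductionDup : List String × (List (String × List Int)) :=
  (["aab", "bc"], [("a", [2]), ("b", [1])])

def Spec_reductionDup (initial : List String) (duplication : List (String × List Int)) (out : List String) : Prop := out = reductionDup_alt initial duplication
instance (initial : List String) (duplication : List (String × List Int)) (out : List String) : Decidable (Spec_reductionDup initial duplication out) := by unfold Spec_reductionDup; infer_instance

-- ===== CLAIM (what is proved, stated in full; the proofs are below) =====
def Claim_equal_reductionDup : Prop := ∀ (initial : List String) (duplication : List (String × List Int)), Dom_reductionDup initial duplication → Pre_reductionDup initial duplication → Spec_reductionDup initial duplication (reductionDup initial duplication)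

-- ===== LEMMAS AND PROOFS =====

-- contribution of one non-initial index of A's loop: current char, previous char
def pvStep (duplication : List (String × List Int)) (cur prev : Char) : List Char :=
  if cur = prev then (if pvRunKeep duplication cur then [cur] else []) else [cur]

-- A's loop from index 1 on, as structural recursion carrying the previous char
def pvGo (duplication : List (String × List Int)) : Char → List Char → List Char
  | _, [] => []
  | prev, c :: rest => pvStep duplication c prev ++ pvGo duplication c rest

def pvCollapse (duplication : List (String × List Int)) : List Char → List Char
  | [] => []
  | c :: rest => c :: pvGo duplication c rest

lemma pvGo_range (dup : List (String × List Int)) (rest : List Char) :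
    ∀ prev, (List.range rest.length).flatMap
      (fun i => pvStep dup (rest.getD i ' ') (if i = 0 then prev else rest.getD (i - 1) ' '))
      = pvGo dup prev rest := by
  induction rest with
  | nil => intro prev; rfl
  | cons c rest' ih =>
    intro prev
    rw [List.length_cons, List.range_succ_eq_map]
    simp only [List.flatMap_cons, List.flatMap_map]
    have h : (fun i => pvStep dup ((c :: rest').getD (i + 1) ' ')
          (if i + 1 = 0 then prev else (c :: rest').getD (i + 1 - 1) ' '))
        = (fun i => pvStep dup (rest'.getD i ' ') (if i = 0 then c else rest'.getD (i - 1) ' ')) := by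
      funext i
      cases i <;> simp [List.getD]
    rw [show (fun i => pvStep dup ((c :: rest').getD (i + 1) ' ')
          (if i + 1 = 0 then prev else (c :: rest').getD (i + 1 - 1) ' ')) = _ from h, ih c]
    simp [pvGo, List.getD]

lemma pvInner_eq_collapse (dup : List (String × List Int)) (l : List Char) :
    (List.range l.length).foldl (fun copy index =>
        if index = 0 then copy ++ [l.getD index ' ']
        else
          if l.getD index ' ' = l.getD (index - 1) ' ' then
            if (PySem.List.pyGet? ((PySem.Dict.mk dup).getD (String.mk [l.getD index ' ']) []) 0).getD 0 == 2 then
              copy ++ [l.getD index ' ']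
            else copy
          else copy ++ [l.getD index ' ']) []
      = pvCollapse dup l := by
  have hb : (fun (copy : List Char) index =>
        if index = 0 then copy ++ [l.getD index ' ']
        else
          if l.getD index ' ' = l.getD (index - 1) ' ' then
            if (PySem.List.pyGet? ((PySem.Dict.mk dup).getD (String.mk [l.getD index ' ']) []) 0).getD 0 == 2 then
              copy ++ [l.getD index ' ']
            else copy
          else copy ++ [l.getD index ' '])
      = (fun copy index => copy ++
          (if index = 0 then [l.getD index ' ']
           else pvStep dup (l.getD index ' ') (l.getD (index - 1) ' '))) := by
    funext copy index
    simp only [pvStep, pvRunKeep]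
    split_ifs <;> simp
  rw [hb, PySem.List.foldl_append_eq_flatMap, List.nil_append]
  cases l with
  | nil => rfl
  | cons c rest =>
    rw [List.length_cons, List.range_succ_eq_map]
    simp only [List.flatMap_cons, List.flatMap_map]
    have h : (fun i => if i + 1 = 0 then [(c :: rest).getD (i + 1) ' ']
          else pvStep dup ((c :: rest).getD (i + 1) ' ') ((c :: rest).getD (i + 1 - 1) ' '))
        = (fun i => pvStep dup (rest.getD i ' ') (if i = 0 then c else rest.getD (i - 1) ' ')) := by
      funext i
      cases i <;> simp [List.getD]
    rw [show (fun i => if i + 1 = 0 then [(c :: rest).getD (i + 1) ' ']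
          else pvStep dup ((c :: rest).getD (i + 1) ' ') ((c :: rest).getD (i + 1 - 1) ' ')) = _ from h,
       pvGo_range dup rest c]
    simp [pvCollapse, List.getD]

lemma pvGo_run (dup : List (String × List Int)) (c : Char) (run tail : List Char)
    (h : ∀ x ∈ run, x = c) :
    pvGo dup c (run ++ tail) = (if pvRunKeep dup c then run else []) ++ pvGo dup c tail := by
  induction run with
  | nil => simp
  | cons x run' ih =>
    have hx : x = c := h x (by simp)
    subst hx
    have := ih (fun y hy => h y (by simp [hy]))
    simp only [List.cons_append, pvGo, pvStep, this]
    by_cases hk : pvRunKeep dup x = true <;> simp [hk]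

lemma pvGo_dropWhile (dup : List (String × List Int)) (c : Char) (rest : List Char) :
    pvGo dup c (rest.dropWhile (fun x => x == c)) = pvCollapse dup (rest.dropWhile (fun x => x == c)) := by
  cases h : rest.dropWhile (fun x => x == c) with
  | nil => rfl
  | cons d t =>
    have hw : rest.dropWhile (fun x => x == c) ≠ [] := by simp [h]
    have hd := List.head_dropWhile_not (p := fun x => x == c) (l := rest) hw
    simp only [h, List.head_cons, beq_eq_false_iff_ne, ne_eq] at hd
    simp [pvGo, pvCollapse, pvStep, hd]

lemma pvCollapse_eq_flatten (dup : List (String × List Int)) (l : List Char) :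
    pvCollapse dup l = (pvPieces dup l).flatten := by
  induction l using pvPieces.induct dup with
  | case1 => simp [pvPieces, pvCollapse]
  | case2 c rest tail ih =>
    have ih' : pvCollapse dup (rest.dropWhile (fun x => x == c))
        = (pvPieces dup (rest.dropWhile (fun x => x == c))).flatten := ih
    rw [pvPieces]
    have hrun : ∀ x ∈ rest.takeWhile (fun x => x == c), x = c := by
      intro x hx
      simpa using List.mem_takeWhile_imp hx
    have hgo : pvGo dup c rest
        = (if pvRunKeep dup c then rest.takeWhile (fun x => x == c) else [])
          ++ pvCollapse dup (rest.dropWhile (fun x => x == c)) := by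
      conv_lhs => rw [← List.takeWhile_append_dropWhile (p := fun x => x == c) (l := rest)]
      rw [pvGo_run dup c _ _ hrun, pvGo_dropWhile dup c rest]
    have hpiece : (if (rest.takeWhile (fun x => x == c)).length + 1 = 1 then [c]
          else if pvRunKeep dup c then c :: rest.takeWhile (fun x => x == c) else [c])
        = c :: (if pvRunKeep dup c then rest.takeWhile (fun x => x == c) else []) := by
      cases hr : rest.takeWhile (fun x => x == c) with
      | nil => simp
      | cons a r => by_cases hk : pvRunKeep dup c = true <;> simp [hk]
    simp only [List.flatten_cons, ← ih', hpiece, pvCollapse, hgo, List.cons_append]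

lemma pvElement_eq (dup : List (String × List Int)) (element : String) (result : List String) :
    (let chars := element.toList
     let copy : List Char :=
       (List.range chars.length).foldl (fun copy index =>
         if index = 0 then copy ++ [chars.getD index ' ']
         else
           if chars.getD index ' ' = chars.getD (index - 1) ' ' then
             if (PySem.List.pyGet? ((PySem.Dict.mk dup).getD (String.mk [chars.getD index ' ']) []) 0).getD 0 == 2 then
               copy ++ [chars.getD index ' ']
             else copy
           else copy ++ [chars.getD index ' ']) []
     if copy.length > 0 then PySem.Set.add result (String.mk copy) else result)
    = (let pieces := pvPieces dup element.toList
       if pieces ≠ [] then PySem.Set.add result (String.mk pieces.flatten) else result) := by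
  simp only
  rw [pvInner_eq_collapse dup element.toList]
  cases h : element.toList with
  | nil => simp [pvCollapse, pvPieces]
  | cons c rest =>
    have hc : pvCollapse dup (c :: rest) = (pvPieces dup (c :: rest)).flatten :=
      pvCollapse_eq_flatten dup (c :: rest)
    rw [hc]
    have hne : pvPieces dup (c :: rest) ≠ [] := by rw [pvPieces]; simp
    have hlen : 0 < (pvPieces dup (c :: rest)).flatten.length := by
      rw [pvPieces]
      simp only [List.flatten_cons, List.length_append]
      have : (if (rest.takeWhile (fun x => x == c)).length + 1 = 1 then [c]
          else if pvRunKeep dup c then c :: rest.takeWhile (fun x => x == c) else [c]).length > 0 := by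
        split_ifs <;> simp
      omega
    rw [if_pos hlen, if_pos hne]

-- ===== VERDICT (by name: the statement is the Claim_ definition above) =====
theorem reductionDup_spec : Claim_equal_reductionDup := by
  intro initial duplication _dom _pre
  unfold Spec_reductionDup reductionDup reductionDup_alt
  congr 1
  funext result element
  exact pvElement_eq duplication element result
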